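-- pv_equiv track=rewrite | github.com/andrrew-c/property-data-scraper | flats_tools.py | getPropertyInfo_TidyVars
-- ===== SOURCE A (Python) =====
-- def getPropertyInfo_TidyVars(basic_dict):
--     pass
--     #return dictionary
--
--     ## Price
--     tidy = {'price':{None:-9}}
--
--     for k in basic_dict.keys():
--
--         ## If this key should be tidied
--         if k in tidy.keys():
--
--             if basic_dict[k] in tidy[k].keys():
--                 #
--                 basic_dict.update({k:tidy[k][basic_dict[k]]})
--
--     return basic_dict
-- ===== SOURCE B (Python) =====
-- def getPropertyInfo_TidyVars(basic_dict):
--     # The tidy table only maps basic_dict['price'] from None to -9: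
--     # do that one replacement directly instead of scanning every key.
--     if 'price' in basic_dict and basic_dict['price'] is None:
--         basic_dict['price'] = -9
--     return basic_dict
-- ===== Notes on version B (the rewrite author's own statement) =====
-- stated objective: simpler
-- what changed: Replaces A's loop over every key of basic_dict (testing each against the one-entry tidy table) with a single direct conditional update of the 'price' key; no loop at all.
import Mathlib
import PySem

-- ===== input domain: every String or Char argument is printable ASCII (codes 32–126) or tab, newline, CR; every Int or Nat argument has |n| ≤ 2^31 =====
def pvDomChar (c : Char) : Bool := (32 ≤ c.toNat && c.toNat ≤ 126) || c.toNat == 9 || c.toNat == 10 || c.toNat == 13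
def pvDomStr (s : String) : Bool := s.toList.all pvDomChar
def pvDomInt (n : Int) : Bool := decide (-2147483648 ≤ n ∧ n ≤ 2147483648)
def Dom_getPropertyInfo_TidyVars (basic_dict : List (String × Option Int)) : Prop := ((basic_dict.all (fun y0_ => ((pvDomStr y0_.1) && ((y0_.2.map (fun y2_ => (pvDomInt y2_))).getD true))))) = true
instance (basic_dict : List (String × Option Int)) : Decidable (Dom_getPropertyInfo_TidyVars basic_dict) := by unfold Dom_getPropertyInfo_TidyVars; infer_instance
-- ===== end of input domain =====

-- B replaces A's loop over all keys of basic_dict with one direct conditional update of 'price'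
-- (objective: simpler). Both the Python A and B mutate basic_dict in place and return it;
-- the theorems here are about the returned value.


-- ===== PORT A =====
-- tidy = {'price': {None: -9}}
def pvTidy : PySem.Dict String (PySem.Dict (Option Int) Int) :=
  PySem.Dict.mk [("price", PySem.Dict.mk [((none : Option Int), (-9 : Int))])]

-- one iteration of A's 'for k in basic_dict.keys()' body
def pvStepA (d : PySem.Dict String (Option Int)) (k : String) : PySem.Dict String (Option Int) :=
  match pvTidy.get? k with
  | some m =>
    match d.get? k with            -- basic_dict[k]; k comes from basic_dict.keys(), always present
    | some v =>
      match m.get? v with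
      | some nv => d.insert k (some nv)   -- basic_dict.update({k: tidy[k][basic_dict[k]]})
      | none => d
    | none => d
  | none => d

def getPropertyInfo_TidyVars (basic_dict : List (String × Option Int)) : List (String × Option Int) :=
  let d0 := PySem.Dict.mk basic_dict
  ((PySem.Dict.keys d0).foldl pvStepA d0).items

-- ===== PORT B =====
def getPropertyInfo_TidyVars_alt (basic_dict : List (String × Option Int)) : List (String × Option Int) :=
  let d := PySem.Dict.mk basic_dict
  -- if 'price' in basic_dict and basic_dict['price'] is None: basic_dict['price'] = -9
  if d.contains "price" && (d.get? "price" == some (none : Option Int)) then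
    (d.insert "price" (some (-9))).items
  else
    d.items

-- ===== PRECONDITION & SPEC =====
def Spec_getPropertyInfo_TidyVars (basic_dict : List (String × Option Int)) (out : List (String × Option Int)) : Prop := out = getPropertyInfo_TidyVars_alt basic_dict
instance (basic_dict : List (String × Option Int)) (out : List (String × Option Int)) : Decidable (Spec_getPropertyInfo_TidyVars basic_dict out) := by unfold Spec_getPropertyInfo_TidyVars; infer_instance

-- ===== CLAIM (what is proved, stated in full; the proofs are below) =====
def Claim_equal_getPropertyInfo_TidyVars : Prop := ∀ (basic_dict : List (String × Option Int)), Dom_getPropertyInfo_TidyVars basic_dict → Spec_getPropertyInfo_TidyVars basic_dict (getPropertyInfo_TidyVars basic_dict)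

-- ===== LEMMAS AND PROOFS =====

-- a step at a key other than "price" is the identity
theorem pvStepA_ne (d : PySem.Dict String (Option Int)) (k : String) (h : k ≠ "price") :
    pvStepA d k = d := by
  unfold pvStepA pvTidy
  have : (PySem.Dict.mk [("price", PySem.Dict.mk [((none : Option Int), (-9 : Int))])]).get? k = none := by
    simp [PySem.Dict.get?, Ne.symm h]
  rw [this]

-- a step at "price" does the conditional replacement
theorem pvStepA_price (d : PySem.Dict String (Option Int)) :
    pvStepA d "price" =
      if d.get? "price" = some (none : Option Int) then d.insert "price" (some (-9)) else d := by
  unfold pvStepA pvTidy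
  rcases hv : d.get? "price" with _ | v
  · simp [PySem.Dict.get?]
  · rcases v with _ | n
    · simp [PySem.Dict.get?]
    · simp [PySem.Dict.get?]

-- the whole loop, for any key list
theorem pvLoopA (ks : List String) (d : PySem.Dict String (Option Int)) :
    ks.foldl pvStepA d =
      if "price" ∈ ks ∧ d.get? "price" = some (none : Option Int) then
        d.insert "price" (some (-9))
      else d := by
  induction ks generalizing d with
  | nil => simp
  | cons k ks ih =>
    by_cases hk : k = "price"
    · subst hk
      rw [List.foldl_cons, pvStepA_price]
      by_cases hv : d.get? "price" = some (none : Option Int)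
      · rw [if_pos hv, ih]
        have h2 : (d.insert "price" (some (-9))).get? "price" = some (some (-9)) :=
          PySem.Dict.get?_insert_self d "price" (some (-9))
        rw [if_neg (by simp [h2]), if_pos ⟨List.mem_cons_self, hv⟩]
      · rw [if_neg hv, ih, if_neg (by simp [hv]), if_neg (by simp [hv])]
    · rw [List.foldl_cons, pvStepA_ne d k hk, ih]
      simp [List.mem_cons, Ne.symm hk]

-- ===== VERDICT (by name: the statement is the Claim_ definition above) =====
theorem getPropertyInfo_TidyVars_spec : Claim_equal_getPropertyInfo_TidyVars := by
  intro l _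
  unfold Spec_getPropertyInfo_TidyVars
  simp only [getPropertyInfo_TidyVars, getPropertyInfo_TidyVars_alt]
  rw [pvLoopA]
  by_cases hv : (PySem.Dict.mk l).get? "price" = some (none : Option Int)
  · have hmem : "price" ∈ (PySem.Dict.mk l).keys := by
      by_contra hnm
      rw [(PySem.Dict.get?_eq_none_iff_not_mem_keys _ _).mpr hnm] at hv
      simp at hv
    have hc : (PySem.Dict.mk l).contains "price" = true :=
      (PySem.Dict.contains_iff_mem_keys _ _).mpr hmem
    rw [if_pos ⟨hmem, hv⟩]
    simp [hc, hv]
  · rw [if_neg (by simp [hv])]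
    by_cases hc : (PySem.Dict.mk l).contains "price"
    · simp [hc, hv]
    · simp [hc]
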